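-- pv_equiv track=rewrite | github.com/Rz06868/DSA-PROJECT | rz06868_lab9.py | getNearestNeighbor
-- ===== SOURCE A (Python) =====
-- def getNearestNeighbor(G, node):
--     lst = []
--     a = G.get(node)
--     for i in a:
--         lst.append(i[1])
--     b = min(lst)
--     for j in a:
--         if j[1] == b:
--             return j[0]
--
-- G = {0: [(1, 1), (2, 1)], 1: [(2, 1), (3, 1)], 2: [
--     (4, 1)], 3: [(4, 1), (5, 1)], 4: [(5, 1)], 5: []}
-- ===== SOURCE B (Python) =====
-- def getNearestNeighbor(G, node):
--     a = G.get(node)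
--     best = a[0]
--     for x in a[1:]:
--         if x[1] < best[1]:
--             best = x
--     return best[0]
-- ===== Notes on version B (the rewrite author's own statement) =====
-- stated objective: simpler
-- what changed: Replaces A's three passes (collect weights, min(), re-scan for the first match) with one pass keeping a running best (node, weight) pair updated only on strictly smaller weight, so the first minimal neighbor still wins.
import Mathlib
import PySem

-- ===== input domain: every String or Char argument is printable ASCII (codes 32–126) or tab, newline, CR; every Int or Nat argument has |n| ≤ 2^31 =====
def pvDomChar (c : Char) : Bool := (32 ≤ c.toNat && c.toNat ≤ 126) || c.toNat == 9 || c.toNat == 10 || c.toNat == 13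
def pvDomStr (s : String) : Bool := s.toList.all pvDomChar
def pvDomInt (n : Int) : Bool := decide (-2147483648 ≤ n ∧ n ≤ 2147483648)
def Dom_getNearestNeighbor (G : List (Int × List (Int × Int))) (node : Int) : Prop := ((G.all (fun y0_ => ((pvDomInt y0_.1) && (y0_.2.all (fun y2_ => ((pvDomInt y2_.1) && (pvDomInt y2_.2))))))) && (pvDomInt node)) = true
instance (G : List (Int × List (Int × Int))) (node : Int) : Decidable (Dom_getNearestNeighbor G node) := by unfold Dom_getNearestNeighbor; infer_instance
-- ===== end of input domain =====

-- B replaces A's three passes (collect weights, min, re-scan for first match) with one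
-- running-best pass; objective: simpler. Equivalence is about the return value.

-- ===== PORT A =====
-- lst = []; for i in a: lst.append(i[1]); b = min(lst); for j in a: if j[1] == b: return j[0]
def getNearestNeighbor (G : List (Int × List (Int × Int))) (node : Int) : Int :=
  match (PySem.Dict.mk G).get? node with
  | none => 0      -- Python: TypeError (iterating None); excluded by Pre_
  | some a =>
    let lst : List Int := a.foldl (fun acc i => acc ++ [i.2]) []
    match PySem.List.min? lst (fun y => y) with
    | none => 0    -- Python: ValueError min([]); excluded by Pre_
    | some b =>
      match a.find? (fun j => j.2 == b) with
      | some j => j.1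
      | none => 0  -- Python falls off the loop returning None; unreachable (b ∈ lst)

-- ===== PORT B =====
-- best = a[0]; for x in a[1:]: if x[1] < best[1]: best = x; return best[0]
def pvBestLoop (best : Int × Int) (rest : List (Int × Int)) : Int × Int :=
  rest.foldl (fun b x => if x.2 < b.2 then x else b) best

def getNearestNeighbor_alt (G : List (Int × List (Int × Int))) (node : Int) : Int :=
  match (PySem.Dict.mk G).get? node with
  | none => 0      -- Python: a[0] on None raises; excluded by Pre_
  | some [] => 0   -- Python: IndexError a[0]; excluded by Pre_
  | some (h :: t) => (pvBestLoop h t).1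

-- ===== PRECONDITION & SPEC =====
-- Pre_ excludes exactly the inputs where Python A raises: node missing from G
-- (TypeError: iterating None) or node mapped to an empty neighbor list (ValueError: min([])).
def Pre_getNearestNeighbor (G : List (Int × List (Int × Int))) (node : Int) : Prop :=
  ((PySem.Dict.mk G).get? node).getD [] ≠ []
instance (G : List (Int × List (Int × Int))) (node : Int) : Decidable (Pre_getNearestNeighbor G node) := by unfold Pre_getNearestNeighbor; infer_instance

def pvWitness_getNearestNeighbor : (List (Int × List (Int × Int))) × Int :=
  ([(0, [(1, 3), (2, 1), (3, 1)]), (1, [(2, 1)])], 0)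

def Spec_getNearestNeighbor (G : List (Int × List (Int × Int))) (node : Int) (out : Int) : Prop := out = getNearestNeighbor_alt G node
instance (G : List (Int × List (Int × Int))) (node : Int) (out : Int) : Decidable (Spec_getNearestNeighbor G node out) := by unfold Spec_getNearestNeighbor; infer_instance

-- ===== CLAIM (what is proved, stated in full; the proofs are below) =====
def Claim_equal_getNearestNeighbor : Prop := ∀ (G : List (Int × List (Int × Int))) (node : Int), Dom_getNearestNeighbor G node → Pre_getNearestNeighbor G node → Spec_getNearestNeighbor G node (getNearestNeighbor G node)

-- ===== LEMMAS AND PROOFS =====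

-- snd of the running best is the running min of the weights
theorem pvBestLoop_snd (t : List (Int × Int)) : ∀ h : Int × Int,
    (pvBestLoop h t).2 = (t.map Prod.snd).foldl min h.2 := by
  induction t with
  | nil => intro h; rfl
  | cons x t ih =>
    intro h
    simp only [pvBestLoop, List.foldl_cons, List.map_cons] at *
    by_cases hx : x.2 < h.2
    · simp [hx, ih x, min_eq_right (le_of_lt hx)]
    · simp [hx, ih h, min_eq_left (not_lt.mp hx)]

theorem pvBestLoop_eq_or_lt (t : List (Int × Int)) : ∀ h : Int × Int,
    pvBestLoop h t = h ∨ (pvBestLoop h t).2 < h.2 := by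
  induction t with
  | nil => intro h; exact Or.inl rfl
  | cons x t ih =>
    intro h
    simp only [pvBestLoop, List.foldl_cons] at *
    by_cases hx : x.2 < h.2
    · right
      simp only [if_pos hx]
      rcases ih x with he | hlt
      · rw [he]; exact hx
      · exact lt_trans hlt hx
    · simp only [if_neg hx]; exact ih h

theorem pvBestLoop_le (t : List (Int × Int)) : ∀ h : Int × Int,
    (pvBestLoop h t).2 ≤ h.2 := by
  induction t with
  | nil => intro h; exact le_refl _
  | cons x t ih =>
    intro h
    simp only [pvBestLoop, List.foldl_cons] at *
    by_cases hx : x.2 < h.2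
    · simp only [if_pos hx]; exact le_trans (ih x) (le_of_lt hx)
    · simp only [if_neg hx]; exact ih h

-- the first element whose weight equals the best weight IS the running best
theorem pvBestLoop_find (t : List (Int × Int)) : ∀ h : Int × Int,
    (h :: t).find? (fun j => j.2 == (pvBestLoop h t).2) = some (pvBestLoop h t) := by
  induction t with
  | nil => intro h; simp [pvBestLoop, List.find?]
  | cons x t ih =>
    intro h
    by_cases hx : x.2 < h.2
    · have hb : pvBestLoop h (x :: t) = pvBestLoop x t := by
        simp [pvBestLoop, List.foldl_cons, if_pos hx]
      have hlt : (pvBestLoop x t).2 < h.2 := lt_of_le_of_lt (pvBestLoop_le t x) hx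
      have hne : (h.2 == (pvBestLoop x t).2) = false := by
        simp; omega
      rw [hb]
      rw [List.find?_cons_of_neg (by simp [hne])]
      exact ih x
    · have hb : pvBestLoop h (x :: t) = pvBestLoop h t := by
        simp [pvBestLoop, List.foldl_cons, if_neg hx]
      rw [hb]
      by_cases hh : h.2 = (pvBestLoop h t).2
      · rcases pvBestLoop_eq_or_lt t h with he | hlt
        · rw [List.find?_cons_of_pos (by simp [hh]), he]
        · exact absurd hlt (by rw [hh]; exact lt_irrefl _)
      · have hlt : (pvBestLoop h t).2 < h.2 :=
          lt_of_le_of_ne (pvBestLoop_le t h) (fun e => hh e.symm)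
        have hxx : ¬ (x.2 = (pvBestLoop h t).2) := by
          have : h.2 ≤ x.2 := not_lt.mp hx
          omega
        rw [List.find?_cons_of_neg (by simp [hh])]
        rw [List.find?_cons_of_neg (by simp [hxx])]
        have := ih h
        rw [List.find?_cons_of_neg (by simp [hh])] at this
        exact this

-- ===== VERDICT (by name: the statement is the Claim_ definition above) =====
theorem getNearestNeighbor_spec : Claim_equal_getNearestNeighbor := by
  intro G node _ hpre
  unfold Spec_getNearestNeighbor getNearestNeighbor getNearestNeighbor_alt
  unfold Pre_getNearestNeighbor at hpre
  cases hget : (PySem.Dict.mk G).get? node with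
  | none => simp [hget] at hpre
  | some a =>
    cases a with
    | nil => simp [hget] at hpre
    | cons h t =>
      simp only [hget]
      rw [PySem.List.foldl_append_singleton_eq_map (fun i : Int × Int => i.2) (h :: t) []]
      simp only [List.nil_append, List.map_cons]
      rw [PySem.List.min?_id_cons]
      rw [show (t.map fun i : Int × Int => i.2) = t.map Prod.snd from rfl]
      rw [← pvBestLoop_snd t h]
      simp [pvBestLoop_find t h]
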